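-- pv_equiv track=rewrite | github.com/mlmarcosluan/mc102 | lab18.py | pontos
-- ===== SOURCE A (Python) =====
-- def pontos (paises, ouro, prata, bronze, O, P, B):
--
--     pontos_por_pais = {}
--
--     for i in range (len (paises)):
--
--         pais = paises[i]
--         aux = ouro.count (pais)
--         ponto = aux * O
--
--         aux = prata.count (pais)
--         ponto = ponto + (aux * P)
--
--         aux = bronze.count (pais)
--         ponto = ponto + (aux * B)
--
--         pontos_por_pais[pais] = ponto
--
--     return pontos_por_pais
-- ===== SOURCE B (Python) =====
-- def pontos(paises, ouro, prata, bronze, O, P, B):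
--     pontos_por_pais = {p: 0 for p in paises}
--     for m in ouro:
--         if m in pontos_por_pais:
--             pontos_por_pais[m] += O
--     for m in prata:
--         if m in pontos_por_pais:
--             pontos_por_pais[m] += P
--     for m in bronze:
--         if m in pontos_por_pais:
--             pontos_por_pais[m] += B
--     return pontos_por_pais
-- ===== Notes on version B (the rewrite author's own statement) =====
-- stated objective: faster
-- what changed: Replaces A's per-country .count scans over each medal list with a dict pre-initialised to {p: 0}, then one membership-guarded scatter pass over each medal list that adds O/P/B to the matching country.
import Mathlib
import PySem

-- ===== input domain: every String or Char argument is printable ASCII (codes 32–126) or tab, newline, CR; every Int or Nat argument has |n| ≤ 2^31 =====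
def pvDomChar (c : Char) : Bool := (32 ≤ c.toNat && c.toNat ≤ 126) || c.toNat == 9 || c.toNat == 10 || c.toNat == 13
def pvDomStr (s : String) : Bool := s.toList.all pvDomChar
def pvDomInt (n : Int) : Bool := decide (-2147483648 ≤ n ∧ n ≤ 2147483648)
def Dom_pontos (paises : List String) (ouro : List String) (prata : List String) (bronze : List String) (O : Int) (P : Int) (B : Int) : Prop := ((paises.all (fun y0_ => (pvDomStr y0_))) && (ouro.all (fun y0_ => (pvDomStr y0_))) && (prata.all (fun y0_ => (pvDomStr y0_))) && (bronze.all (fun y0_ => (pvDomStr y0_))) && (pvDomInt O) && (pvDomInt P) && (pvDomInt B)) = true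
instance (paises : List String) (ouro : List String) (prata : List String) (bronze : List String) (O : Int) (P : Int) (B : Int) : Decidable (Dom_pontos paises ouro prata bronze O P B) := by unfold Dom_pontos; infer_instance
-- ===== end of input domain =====

-- B replaces A's per-country .count scans by a dict pre-initialised to 0 and one scatter pass
-- over each medal list (objective: faster, O(n+m) vs O(n*m)).


-- ===== PORT A =====
def pontos (paises : List String) (ouro : List String) (prata : List String) (bronze : List String) (O : Int) (P : Int) (B : Int) : List (String × Int) :=
  ((PySem.List.pyRange 0 (PySem.List.len paises)).foldl
    (fun d i =>
      let pais := PySem.List.pyGetD paises i ""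
      let aux : Int := (ouro.count pais : Int)
      let ponto := aux * O
      let aux2 : Int := (prata.count pais : Int)
      let ponto2 := ponto + aux2 * P
      let aux3 : Int := (bronze.count pais : Int)
      let ponto3 := ponto2 + aux3 * B
      d.insert pais ponto3)
    PySem.Dict.empty).items

-- ===== PORT B =====
-- one guarded scatter pass: for m in medals: if m in d: d[m] += c
def pvScatter (medals : List String) (c : Int) (d : PySem.Dict String Int) : PySem.Dict String Int :=
  medals.foldl (fun d m => if d.contains m then d.modify m 0 (· + c) else d) d

def pontos_alt (paises : List String) (ouro : List String) (prata : List String) (bronze : List String) (O : Int) (P : Int) (B : Int) : List (String × Int) :=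
  let d0 := paises.foldl (fun d p => d.insert p (0 : Int)) PySem.Dict.empty
  (pvScatter bronze B (pvScatter prata P (pvScatter ouro O d0))).items

-- ===== PRECONDITION & SPEC =====
def Spec_pontos (paises : List String) (ouro : List String) (prata : List String) (bronze : List String) (O : Int) (P : Int) (B : Int) (out : List (String × Int)) : Prop := out = pontos_alt paises ouro prata bronze O P B
instance (paises : List String) (ouro : List String) (prata : List String) (bronze : List String) (O : Int) (P : Int) (B : Int) (out : List (String × Int)) : Decidable (Spec_pontos paises ouro prata bronze O P B out) := by unfold Spec_pontos; infer_instance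

-- ===== CLAIM (what is proved, stated in full; the proofs are below) =====
def Claim_equal_pontos : Prop := ∀ (paises : List String) (ouro : List String) (prata : List String) (bronze : List String) (O : Int) (P : Int) (B : Int), Dom_pontos paises ouro prata bronze O P B → Spec_pontos paises ouro prata bronze O P B (pontos paises ouro prata bronze O P B)

-- ===== LEMMAS AND PROOFS =====

-- final value at k of an insert loop whose value depends only on the key
theorem getD_foldl_insert_keyval (l : List String) (val : String → Int)
    (d : PySem.Dict String Int) (k : String) :
    (l.foldl (fun d p => d.insert p (val p)) d).getD k 0
      = if k ∈ l then val k else d.getD k 0 := by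
  induction l generalizing d with
  | nil => simp
  | cons p rest ih =>
    simp only [List.foldl_cons, ih, PySem.Dict.getD_insert, List.mem_cons]
    by_cases h1 : k ∈ rest <;> by_cases h2 : k = p <;> simp [h1, h2]

theorem pvScatter_contains (l : List String) (c : Int) (d : PySem.Dict String Int) (k : String) :
    (pvScatter l c d).contains k = d.contains k := by
  induction l generalizing d with
  | nil => rfl
  | cons m rest ih =>
    simp only [pvScatter, List.foldl_cons] at *
    by_cases hm : d.contains m
    · simp only [hm, if_pos, ih, PySem.Dict.contains_modify]
      by_cases hk : k = m <;> simp [hk, hm]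
    · simp [hm, ih]

theorem pvScatter_getD (l : List String) (c : Int) (d : PySem.Dict String Int) (k : String) :
    (pvScatter l c d).getD k 0
      = d.getD k 0 + (if d.contains k then (l.count k : Int) * c else 0) := by
  induction l generalizing d with
  | nil => simp [pvScatter]
  | cons m rest ih =>
    simp only [pvScatter, List.foldl_cons] at *
    by_cases hm : d.contains m
    · rw [if_pos hm, ih, PySem.Dict.getD_modify]
      have hc : (d.modify m 0 (· + c)).contains k = (k == m || d.contains k) :=
        PySem.Dict.contains_modify d m k 0 _
      rw [hc]
      by_cases hk : k = m
      · subst hk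
        simp only [beq_self_eq_true, Bool.true_or, if_pos, hm, List.count_cons_self]
        push_cast
        ring
      · have hb : (k == m) = false := by simp [hk]
        simp [hb, Ne.symm hk, hk]
    · rw [if_neg hm, ih]
      by_cases hk : k = m
      · subst hk; simp [hm]
      · simp [Ne.symm hk]

theorem pvScatter_keys (l : List String) (c : Int) (d : PySem.Dict String Int) :
    (pvScatter l c d).keys = d.keys := by
  induction l generalizing d with
  | nil => rfl
  | cons m rest ih =>
    simp only [pvScatter, List.foldl_cons] at *
    by_cases hm : d.contains m
    · rw [if_pos hm, ih, PySem.Dict.keys_modify, PySem.Dict.keys_insert_of_contains]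
      rw [hm]
    · rw [if_neg hm, ih]

-- ===== VERDICT (by name: the statement is the Claim_ definition above) =====
theorem pontos_spec : Claim_equal_pontos := by
  intro paises ouro prata bronze O P B _
  unfold Spec_pontos pontos pontos_alt
  set val : String → Int :=
    fun pais => (ouro.count pais : Int) * O + ((prata.count pais : Int) * P)
      + ((bronze.count pais : Int) * B) with hval
  have hA : (PySem.List.pyRange 0 (PySem.List.len paises)).foldl
      (fun d i =>
        let pais := PySem.List.pyGetD paises i ""
        let aux : Int := (ouro.count pais : Int)
        let ponto := aux * O
        let aux2 : Int := (prata.count pais : Int)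
        let ponto2 := ponto + aux2 * P
        let aux3 : Int := (bronze.count pais : Int)
        let ponto3 := ponto2 + aux3 * B
        d.insert pais ponto3)
      PySem.Dict.empty
      = paises.foldl (fun d p => d.insert p (val p)) PySem.Dict.empty := by
    exact PySem.List.foldl_pyRange_zero_pyGetD paises ""
      (fun d pais => d.insert pais (val pais)) PySem.Dict.empty
  rw [hA]
  set dA := paises.foldl (fun d p => d.insert p (val p)) PySem.Dict.empty with hdA
  set d0 := paises.foldl (fun d p => d.insert p (0 : Int)) PySem.Dict.empty with hd0
  set dB := pvScatter bronze B (pvScatter prata P (pvScatter ouro O d0)) with hdB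
  -- same keys on both sides
  have hkA : dA.keys = PySem.Set.update (PySem.Dict.empty : PySem.Dict String Int).keys paises :=
    PySem.Dict.keys_foldl_insert paises (fun _ p => val p) _
  have hk0 : d0.keys = PySem.Set.update (PySem.Dict.empty : PySem.Dict String Int).keys paises :=
    PySem.Dict.keys_foldl_insert paises (fun _ _ => (0 : Int)) _
  have hkB : dB.keys = d0.keys := by
    rw [hdB, pvScatter_keys, pvScatter_keys, pvScatter_keys]
  have hnodA : dA.keys.Nodup :=
    PySem.Dict.nodup_keys_foldl_insert paises _ _ PySem.Dict.nodup_keys_empty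
  have hnodB : dB.keys.Nodup := by rw [hkB, hk0, ← hkA]; exact hnodA
  rw [PySem.Dict.items_eq_map_keys dA hnodA 0, PySem.Dict.items_eq_map_keys dB hnodB 0,
    hkB, hk0, ← hkA]
  apply List.map_congr_left
  intro k hk
  have hkmem : k ∈ paises := by
    rw [hkA] at hk
    have h2 := (PySem.Set.mem_update ([] : PySem.Set String) paises k).mp hk
    simpa using h2
  have hc0 : d0.contains k = true := by
    rw [PySem.Dict.contains_iff_mem_keys, hk0, ← hkA]; exact hk
  have hc1 : (pvScatter ouro O d0).contains k = true := by
    rw [pvScatter_contains]; exact hc0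
  have hc2 : (pvScatter prata P (pvScatter ouro O d0)).contains k = true := by
    rw [pvScatter_contains]; exact hc1
  have hg0 : d0.getD k 0 = 0 := by
    rw [hd0, getD_foldl_insert_keyval paises (fun _ => 0)]
    simp [hkmem]
  have hgB : dB.getD k 0 = val k := by
    rw [hdB, pvScatter_getD, pvScatter_getD, pvScatter_getD, hg0, hc0, hc1, hc2]
    simp [hval]
  have hgA : dA.getD k 0 = val k := by
    rw [hdA, getD_foldl_insert_keyval, if_pos hkmem]
  rw [hgA, hgB]
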